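-- pv_equiv track=rewrite | github.com/unoplat/unoplat-code-confluence | unoplat-code-confluence-ingestion/code-confluence-flow-bridge/src/code_confluence_flow_bridge/parser/package_manager/detectors/typescript_ripgrep_detector.py | _is_nested_under_done_dirs
-- ===== SOURCE A (Python) =====
-- def _is_nested_under_done_dirs(
--     directory_path: str, done_dirs: set[str]
-- ) -> bool:
--     """Check if the directory is under an already processed directory."""
--     if "." in done_dirs and directory_path != ".":
--         return True
--     for done_dir in done_dirs:
--         if (
--             done_dir != "."
--             and directory_path != done_dir
--             and directory_path.startswith(done_dir + "/")
--         ):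
--             return True
--     return False
-- ===== SOURCE B (Python) =====
-- def _is_nested_under_done_dirs(directory_path, done_dirs):
--     """Check nesting by probing the path's ancestor prefixes in the set."""
--     if "." in done_dirs:
--         return directory_path != "."
--     return any(
--         ch == "/" and directory_path[:i] in done_dirs
--         for i, ch in enumerate(directory_path)
--     )
-- ===== Notes on version B (the rewrite author's own statement) =====
-- stated objective: alternative
-- what changed: Instead of scanning every done_dir and testing startswith(done_dir + '/'), B walks the path once and probes each ancestor prefix (text before each '/') for membership in the done_dirs set; cost moves from O(|done_dirs|*L) to O(depth*L).
import Mathlib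
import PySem

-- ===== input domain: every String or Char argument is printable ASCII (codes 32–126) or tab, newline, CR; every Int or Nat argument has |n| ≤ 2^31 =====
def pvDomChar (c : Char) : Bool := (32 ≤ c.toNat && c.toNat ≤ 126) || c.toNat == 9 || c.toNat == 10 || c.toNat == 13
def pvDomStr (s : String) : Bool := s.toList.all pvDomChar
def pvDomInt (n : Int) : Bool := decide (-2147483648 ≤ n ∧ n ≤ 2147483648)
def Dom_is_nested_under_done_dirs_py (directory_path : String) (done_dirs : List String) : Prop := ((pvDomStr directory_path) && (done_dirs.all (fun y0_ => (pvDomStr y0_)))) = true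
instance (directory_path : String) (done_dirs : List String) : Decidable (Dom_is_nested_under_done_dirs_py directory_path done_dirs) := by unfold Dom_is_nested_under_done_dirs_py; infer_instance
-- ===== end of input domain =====

-- B replaces A's scan over done_dirs (startswith per element) by one pass over the
-- path that probes each ancestor prefix for membership in done_dirs (alternative algorithm, same measured cost).
-- ===== PORT A =====
-- literal transliteration of A: check "." membership first, then scan done_dirs
-- testing startswith(done_dir + "/") on each.
def aLoop (p : String) : List String → Bool
  | [] => false
  | d :: rest =>
    if d ≠ "." ∧ p ≠ d ∧ PySem.Chars.startswith p.toList (d.toList ++ ['/']) then true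
    else aLoop p rest

def is_nested_under_done_dirs_py (directory_path : String) (done_dirs : List String) : Bool :=
  if done_dirs.contains "." ∧ directory_path ≠ "." then true
  else aLoop directory_path done_dirs

-- ===== PORT B =====
-- literal transliteration of B: "." handled up front, then one pass over the
-- path's characters, probing the prefix before each '/' for membership.
def bLoop (pl : List Char) (done_dirs : List String) : List (Int × Char) → Bool
  | [] => false
  | (i, ch) :: rest =>
    if ch = '/' ∧ done_dirs.contains (String.ofList (PySem.List.slice pl none (some i))) then true
    else bLoop pl done_dirs rest

def is_nested_under_done_dirs_py_alt (directory_path : String) (done_dirs : List String) : Bool :=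
  if done_dirs.contains "." then directory_path ≠ "."
  else bLoop directory_path.toList done_dirs (PySem.List.enumerate directory_path.toList 0)

-- ===== PRECONDITION & SPEC =====
def Spec_is_nested_under_done_dirs_py (directory_path : String) (done_dirs : List String) (out : Bool) : Prop := out = is_nested_under_done_dirs_py_alt directory_path done_dirs
instance (directory_path : String) (done_dirs : List String) (out : Bool) : Decidable (Spec_is_nested_under_done_dirs_py directory_path done_dirs out) := by unfold Spec_is_nested_under_done_dirs_py; infer_instance

-- ===== CLAIM (what is proved, stated in full; the proofs are below) =====
def Claim_equal_is_nested_under_done_dirs_py : Prop := ∀ (directory_path : String) (done_dirs : List String), Dom_is_nested_under_done_dirs_py directory_path done_dirs → Spec_is_nested_under_done_dirs_py directory_path done_dirs (is_nested_under_done_dirs_py directory_path done_dirs)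

-- ===== LEMMAS AND PROOFS =====

theorem aLoop_iff (p : String) (S : List String) :
    aLoop p S = true ↔ ∃ d ∈ S, d ≠ "." ∧ p ≠ d ∧
      PySem.Chars.startswith p.toList (d.toList ++ ['/']) = true := by
  induction S with
  | nil => simp [aLoop]
  | cons d rest ih =>
    have step : aLoop p (d :: rest) = true ↔
        (d ≠ "." ∧ p ≠ d ∧ PySem.Chars.startswith p.toList (d.toList ++ ['/']) = true)
          ∨ aLoop p rest = true := by
      rw [aLoop]
      split
      · next h => simp [h]
      · next h => simp [h]
    rw [step, ih]
    constructor
    · rintro (⟨h1, h2, h3⟩ | ⟨x, hx, h1, h2, h3⟩)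
      · exact ⟨d, List.mem_cons_self .., h1, h2, h3⟩
      · exact ⟨x, List.mem_cons_of_mem _ hx, h1, h2, h3⟩
    · rintro ⟨x, hx, h1, h2, h3⟩
      rcases List.mem_cons.mp hx with h | h
      · subst h; exact Or.inl ⟨h1, h2, h3⟩
      · exact Or.inr ⟨x, h, h1, h2, h3⟩

theorem bLoop_iff (pl : List Char) (S : List String) (e : List (Int × Char)) :
    bLoop pl S e = true ↔ ∃ q ∈ e, q.2 = '/' ∧
      S.contains (String.ofList (PySem.List.slice pl none (some q.1))) = true := by
  induction e with
  | nil => simp [bLoop]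
  | cons q rest ih =>
    obtain ⟨i, ch⟩ := q
    have step : bLoop pl S ((i, ch) :: rest) = true ↔
        (ch = '/' ∧ S.contains (String.ofList (PySem.List.slice pl none (some i))) = true)
          ∨ bLoop pl S rest = true := by
      rw [bLoop]
      split
      · next h =>
        simp
        exact Or.inl ⟨h.1, by simpa using h.2⟩
      · next h =>
        simp
        intro h1 h2
        exact absurd ⟨h1, by simpa using h2⟩ h
    rw [step, ih]
    constructor
    · rintro (⟨h1, h2⟩ | ⟨x, hx, h1, h2⟩)
      · exact ⟨(i, ch), List.mem_cons_self .., h1, h2⟩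
      · exact ⟨x, List.mem_cons_of_mem _ hx, h1, h2⟩
    · rintro ⟨x, hx, h1, h2⟩
      rcases List.mem_cons.mp hx with h | h
      · subst h; exact Or.inl ⟨h1, h2⟩
      · exact Or.inr ⟨x, h, h1, h2⟩

-- the two scans agree when "." is not among the processed directories
theorem loops_agree (p : String) (S : List String) (hdot : "." ∉ S) :
    aLoop p S = bLoop p.toList S (PySem.List.enumerate p.toList 0) := by
  rw [Bool.eq_iff_iff, aLoop_iff, bLoop_iff]
  constructor
  · rintro ⟨d, hdS, -, hpd, hpre⟩
    rw [PySem.Chars.startswith_iff] at hpre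
    obtain ⟨t, ht⟩ := hpre
    rw [List.append_assoc] at ht
    have hk : d.toList.length < p.toList.length := by
      rw [← ht]; simp
    refine ⟨((d.toList.length : Int), p.toList[d.toList.length]), ?_, ?_, ?_⟩
    · rw [PySem.List.mem_enumerate_iff]
      exact ⟨d.toList.length, hk, by simp⟩
    · show p.toList[d.toList.length] = '/'
      rw [← List.getElem_of_eq ht (by simp)]
      simp
    · show S.contains (String.ofList (PySem.List.slice p.toList none ((d.toList.length : Int)))) = true
      rw [PySem.List.slice_to_natCast]
      have htake : p.toList.take d.toList.length = d.toList := by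
        rw [← ht, List.take_left]
      rw [htake]
      simpa using hdS
  · rintro ⟨⟨i, ch⟩, hmem, hch, hcon⟩
    rw [PySem.List.mem_enumerate_iff] at hmem
    obtain ⟨k, hk, hq⟩ := hmem
    obtain ⟨hi, hc⟩ := Prod.mk.injEq .. ▸ hq
    simp only at hch hcon
    subst hch
    rw [hi] at hcon
    simp only [zero_add] at hcon
    rw [PySem.List.slice_to_natCast] at hcon
    refine ⟨String.ofList (p.toList.take k), by simpa using hcon, ?_, ?_, ?_⟩
    · intro h
      exact hdot (h ▸ (by simpa using hcon))
    · intro h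
      have hpl : p.toList = List.take k p.toList := by
        conv_lhs => rw [h]
        simp
      have hlen := congrArg List.length hpl
      simp at hlen hk
      omega
    · rw [PySem.Chars.startswith_iff]
      simp only [String.toList_ofList]
      have h1 : p.toList.take (k + 1) <+: p.toList := List.take_prefix _ _
      rw [List.take_add_one, List.getElem?_eq_getElem hk] at h1
      simpa [← hc] using h1

theorem aLoop_dot_false (S : List String) : aLoop "." S = false := by
  rw [← Bool.not_eq_true, aLoop_iff]
  rintro ⟨d, -, -, -, hpre⟩
  rw [PySem.Chars.startswith_iff] at hpre
  have hlen := hpre.length_le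
  have hdot : (".").toList = ['.'] := by decide
  rw [hdot] at hpre hlen
  simp at hlen
  have hnil : d.toList = [] := by rw [hlen]; decide
  rw [hnil] at hpre
  obtain ⟨t, ht⟩ := hpre
  simp at ht

-- ===== VERDICT (by name: the statement is the Claim_ definition above) =====
theorem is_nested_under_done_dirs_py_spec : Claim_equal_is_nested_under_done_dirs_py := by
  intro p S _
  unfold Spec_is_nested_under_done_dirs_py is_nested_under_done_dirs_py is_nested_under_done_dirs_py_alt
  by_cases hdot : S.contains "." = true
  · have hm : "." ∈ S := by simpa using hdot
    by_cases hp : p = "."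
    · subst hp
      simp [hm, aLoop_dot_false]
    · simp [hm, hp]
  · have hmem : "." ∉ S := by simpa using hdot
    simp [hmem, loops_agree p S hmem]
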